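-- pv_equiv track=rewrite | github.com/tyanzuq2811/air_guard_mini_project | src/semi_supervised_library.py | make_default_views
-- ===== SOURCE A (Python) =====
-- from typing import Optional, Tuple, Dict, List, Iterable
--
-- def make_default_views(feature_cols: Iterable[str]) -> Tuple[List[str], List[str]]:
--     cols = list(feature_cols)
--     v2_patterns = ("station", "wd", "hour_", "dow", "month", "is_weekend", "year", "day", "hour")
--     view2 = [c for c in cols if any(p in c for p in v2_patterns)]
--     view1 = [c for c in cols if c not in set(view2)]
--
--     if len(view1) == 0 or len(view2) == 0:
--         mid = max(1, len(cols) // 2)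
--         view1, view2 = cols[:mid], cols[mid:]
--     return view1, view2
-- ===== SOURCE B (Python) =====
-- def make_default_views(feature_cols):
--     cols = list(feature_cols)
--     v2_patterns = ("station", "wd", "hour_", "dow", "month", "is_weekend", "year", "day", "hour")
--     # Sieve with the PATTERN loop outermost: each pattern removes the columns it
--     # matches from the pending pool, recording their positions; a column already
--     # claimed by an earlier pattern is never scanned again.
--     pending = list(enumerate(cols))
--     matched_idx = set()
--     for p in v2_patterns:
--         rest = []
--         for i, c in pending:
--             if p in c:
--                 matched_idx.add(i)
--             else:
--                 rest.append((i, c))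
--         pending = rest
--     if not pending or not matched_idx:
--         mid = max(1, len(cols) // 2)
--         return cols[:mid], cols[mid:]
--     view1 = [c for _, c in pending]
--     view2 = [c for i, c in enumerate(cols) if i in matched_idx]
--     return view1, view2
-- ===== Notes on version B (the rewrite author's own statement) =====
-- stated objective: alternative
-- what changed: Instead of A's two column-wise filters (match list, then set-complement), B runs a pattern-outer sieve: each pattern removes the columns it matches from a shrinking pending pool of (index, column) pairs, collecting matched indices in a set, and the two views are read off the pool and the index set.
import Mathlib
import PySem

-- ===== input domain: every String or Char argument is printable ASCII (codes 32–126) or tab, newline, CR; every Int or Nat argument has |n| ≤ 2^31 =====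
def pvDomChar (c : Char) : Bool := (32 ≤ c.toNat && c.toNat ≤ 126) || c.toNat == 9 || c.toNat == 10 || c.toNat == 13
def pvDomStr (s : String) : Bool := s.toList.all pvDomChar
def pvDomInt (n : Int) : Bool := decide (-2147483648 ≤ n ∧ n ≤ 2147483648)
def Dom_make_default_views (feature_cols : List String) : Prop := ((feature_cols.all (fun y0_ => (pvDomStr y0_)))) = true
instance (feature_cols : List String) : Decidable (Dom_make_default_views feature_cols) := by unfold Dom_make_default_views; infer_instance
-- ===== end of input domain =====

-- B replaces A's column-wise double filter (matches, then set-complement) by a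
-- pattern-outer sieve over a shrinking pool of (index, column) pairs; same return
-- value, no speed claim.

-- ===== PORT A =====
def pvV2Patterns : List String :=
  ["station", "wd", "hour_", "dow", "month", "is_weekend", "year", "day", "hour"]

def make_default_views (feature_cols : List String) : List String × List String :=
  let cols := feature_cols
  let view2 := cols.filter (fun c => pvV2Patterns.any (fun p => PySem.Str.isIn p c))
  let v2set : PySem.Set String := PySem.Set.ofList view2
  let view1 := cols.filter (fun c => !(PySem.Set.contains v2set c))
  if view1.length = 0 ∨ view2.length = 0 then
    let mid : Int := max 1 (PySem.Int.floordiv (cols.length : Int) 2)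
    (PySem.List.slice cols none (some mid), PySem.List.slice cols (some mid) none)
  else (view1, view2)

-- ===== PORT B =====
def make_default_views_alt (feature_cols : List String) : List String × List String :=
  let cols := feature_cols
  -- pattern-outer sieve: state = (pending pool of (index, column), matched index set)
  let st := pvV2Patterns.foldl
    (fun (st : List (Int × String) × PySem.Set Int) p =>
      st.1.foldl
        (fun (st2 : List (Int × String) × PySem.Set Int) ic =>
          if PySem.Str.isIn p ic.2 then (st2.1, PySem.Set.add st2.2 ic.1)
          else (st2.1 ++ [ic], st2.2))
        (([] : List (Int × String)), st.2))
    (PySem.List.enumerate cols, (PySem.Set.empty : PySem.Set Int))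
  if st.1.length = 0 ∨ st.2.length = 0 then
    let mid : Int := max 1 (PySem.Int.floordiv (cols.length : Int) 2)
    (PySem.List.slice cols none (some mid), PySem.List.slice cols (some mid) none)
  else
    (st.1.map (·.2),
     ((PySem.List.enumerate cols).filter (fun ic => PySem.Set.contains st.2 ic.1)).map (·.2))

-- ===== PRECONDITION & SPEC =====
def Spec_make_default_views (feature_cols : List String) (out : List String × List String) : Prop := out = make_default_views_alt feature_cols
instance (feature_cols : List String) (out : List String × List String) : Decidable (Spec_make_default_views feature_cols out) := by unfold Spec_make_default_views; infer_instance

-- ===== CLAIM (what is proved, stated in full; the proofs are below) =====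
def Claim_equal_make_default_views : Prop := ∀ (feature_cols : List String), Dom_make_default_views feature_cols → Spec_make_default_views feature_cols (make_default_views feature_cols)

-- ===== LEMMAS AND PROOFS =====

-- A's set-complement filter is the negated-predicate filter
lemma pv_filter_complement (q : String → Bool) (cols : List String) :
    cols.filter (fun c => !(PySem.Set.contains (PySem.Set.ofList (cols.filter q)) c))
      = cols.filter (fun c => !q c) := by
  apply List.filter_congr
  intro c hc
  simp [PySem.Set.contains_eq_listContains, PySem.Set.mem_ofList, List.mem_filter, hc]

-- proof-only name for B's sieve fold (the port keeps it inline)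
def pvSieve (Q : String → (Int × String) → Bool) (ps : List String)
    (st0 : List (Int × String) × PySem.Set Int) : List (Int × String) × PySem.Set Int :=
  ps.foldl
    (fun (st : List (Int × String) × PySem.Set Int) p =>
      st.1.foldl
        (fun (st2 : List (Int × String) × PySem.Set Int) ic =>
          if Q p ic then (st2.1, PySem.Set.add st2.2 ic.1)
          else (st2.1 ++ [ic], st2.2))
        (([] : List (Int × String)), st.2))
    st0

-- one pattern's pass over the pending pool
lemma pv_inner (q : Int × String → Bool) (E acc : List (Int × String)) (S : PySem.Set Int) :
    E.foldl
      (fun (st2 : List (Int × String) × PySem.Set Int) ic =>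
        if q ic then (st2.1, PySem.Set.add st2.2 ic.1)
        else (st2.1 ++ [ic], st2.2)) (acc, S)
    = (acc ++ E.filter (fun ic => !q ic),
       PySem.Set.update S ((E.filter q).map (·.1))) := by
  induction E generalizing acc S with
  | nil => simp [PySem.Set.update]
  | cons ic t ih =>
    by_cases h : q ic = true <;>
      simp [List.foldl_cons, h, ih, PySem.Set.update]

-- the sieve: pending = unmatched pairs; matched set holds exactly the matched indices
lemma pv_sieve (Q : String → (Int × String) → Bool) (ps : List String) :
    ∀ (E : List (Int × String)) (S : PySem.Set Int),
      (pvSieve Q ps (E, S)).1 = E.filter (fun ic => !(ps.any (fun p => Q p ic)))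
      ∧ ∀ i : Int, (i ∈ (pvSieve Q ps (E, S)).2
          ↔ i ∈ S ∨ ∃ ic ∈ E, ic.1 = i ∧ ps.any (fun p => Q p ic) = true) := by
  induction ps with
  | nil => intro E S; simp [pvSieve]
  | cons p rest ih =>
    intro E S
    have hstep : pvSieve Q (p :: rest) (E, S)
        = pvSieve Q rest (E.filter (fun ic => !Q p ic),
            PySem.Set.update S ((E.filter (fun ic => Q p ic)).map (·.1))) := by
      simp [pvSieve, List.foldl_cons, pv_inner]
    obtain ⟨h1, h2⟩ := ih (E.filter (fun ic => !Q p ic))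
        (PySem.Set.update S ((E.filter (fun ic => Q p ic)).map (·.1)))
    constructor
    · rw [hstep, h1, List.filter_filter]
      apply List.filter_congr
      intro ic _
      simp [List.any_cons, Bool.not_or, Bool.and_comm]
    · intro i
      rw [hstep, h2 i, PySem.Set.mem_update]
      constructor
      · rintro ((hS | hidx) | ⟨ic, hmem, hi, hrest⟩)
        · exact Or.inl hS
        · obtain ⟨ic, hmemf, hi⟩ := List.mem_map.mp hidx
          obtain ⟨hmem, hp⟩ := List.mem_filter.mp hmemf
          exact Or.inr ⟨ic, hmem, hi, by simp [List.any_cons, hp]⟩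
        · obtain ⟨hmem, _⟩ := List.mem_filter.mp hmem
          exact Or.inr ⟨ic, hmem, hi, by simp [List.any_cons, hrest]⟩
      · rintro (hS | ⟨ic, hmem, hi, hany⟩)
        · exact Or.inl (Or.inl hS)
        · by_cases hp : Q p ic = true
          · exact Or.inl (Or.inr (List.mem_map.mpr
              ⟨ic, List.mem_filter.mpr ⟨hmem, hp⟩, hi⟩))
          · have hrest : rest.any (fun p => Q p ic) = true := by
              simp [List.any_cons, hp] at hany; exact List.any_eq_true.mpr hany
            exact Or.inr ⟨ic, List.mem_filter.mpr ⟨hmem, by simp [hp]⟩, hi, hrest⟩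

-- map snd of a snd-predicate filter of enumerate
lemma pv_map_snd_filter_enumerate (r : String → Bool) (cols : List String) (s : Int) :
    (((PySem.List.enumerate cols s).filter (fun ic => r ic.2)).map (·.2)) = cols.filter r := by
  induction cols generalizing s with
  | nil => simp [PySem.List.enumerate_nil]
  | cons c t ih =>
    by_cases h : r c = true <;> simp [PySem.List.enumerate_cons, h, ih]

-- abbreviations for the main proof
lemma pv_main (cols : List String) :
    make_default_views cols = make_default_views_alt cols := by
  have h := pv_sieve (fun p ic => PySem.Str.isIn p ic.2) pvV2Patterns
      (PySem.List.enumerate cols) PySem.Set.empty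
  obtain ⟨h1, h2⟩ := h
  have hmem : ∀ i : Int, i ∈ (pvSieve (fun p ic => PySem.Str.isIn p ic.2) pvV2Patterns
      (PySem.List.enumerate cols, PySem.Set.empty)).2
      ↔ ∃ ic ∈ PySem.List.enumerate cols, ic.1 = i
          ∧ pvV2Patterns.any (fun p => PySem.Str.isIn p ic.2) = true := by
    intro i
    rw [h2 i]
    simp [PySem.Set.empty]
  have hmap1 : (pvSieve (fun p ic => PySem.Str.isIn p ic.2) pvV2Patterns
      (PySem.List.enumerate cols, PySem.Set.empty)).1.map (·.2)
      = cols.filter (fun c => !(pvV2Patterns.any (fun p => PySem.Str.isIn p c))) := by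
    rw [h1]
    exact pv_map_snd_filter_enumerate (fun c => !(pvV2Patterns.any (fun p => PySem.Str.isIn p c))) cols 0
  have hlen1 : (pvSieve (fun p ic => PySem.Str.isIn p ic.2) pvV2Patterns
      (PySem.List.enumerate cols, PySem.Set.empty)).1.length
      = (cols.filter (fun c => !(pvV2Patterns.any (fun p => PySem.Str.isIn p c)))).length := by
    rw [← hmap1, List.length_map]
  have hcontains : ∀ ic ∈ PySem.List.enumerate cols,
      PySem.Set.contains (pvSieve (fun p ic => PySem.Str.isIn p ic.2) pvV2Patterns
        (PySem.List.enumerate cols, PySem.Set.empty)).2 ic.1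
      = pvV2Patterns.any (fun p => PySem.Str.isIn p ic.2) := by
    intro ic hic
    rw [Bool.eq_iff_iff, PySem.Set.contains_iff, hmem ic.1]
    constructor
    · rintro ⟨jc, hjc, hji, hq⟩
      obtain ⟨k, hk, hpk⟩ := (PySem.List.mem_enumerate_iff _ _ _).mp hjc
      obtain ⟨k', hk', hpk'⟩ := (PySem.List.mem_enumerate_iff _ _ _).mp hic
      have hkk : k = k' := by
        have := hji
        rw [hpk, hpk'] at this
        simp at this
        omega
      subst hkk
      rw [hpk] at hq
      rw [hpk']
      exact hq
    · intro hq
      exact ⟨ic, hic, rfl, hq⟩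
  have hview2 : ((PySem.List.enumerate cols).filter (fun ic =>
        PySem.Set.contains (pvSieve (fun p ic => PySem.Str.isIn p ic.2) pvV2Patterns
          (PySem.List.enumerate cols, PySem.Set.empty)).2 ic.1)).map (·.2)
      = cols.filter (fun c => pvV2Patterns.any (fun p => PySem.Str.isIn p c)) := by
    rw [List.filter_congr hcontains]
    exact pv_map_snd_filter_enumerate (fun c => pvV2Patterns.any (fun p => PySem.Str.isIn p c)) cols 0
  have hlen2 : (pvSieve (fun p ic => PySem.Str.isIn p ic.2) pvV2Patterns
      (PySem.List.enumerate cols, PySem.Set.empty)).2.length = 0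
      ↔ (cols.filter (fun c => pvV2Patterns.any (fun p => PySem.Str.isIn p c))).length = 0 := by
    rw [List.length_eq_zero_iff, List.length_eq_zero_iff]
    constructor
    · intro hnil
      rw [List.filter_eq_nil_iff]
      intro c hc hq
      obtain ⟨ic, hicE, hic2⟩ := List.mem_map.mp (by
        rw [PySem.List.map_snd_enumerate]
        exact hc : c ∈ (PySem.List.enumerate cols (0 : Int)).map (·.2))
      have : ic.1 ∈ (pvSieve (fun p ic => PySem.Str.isIn p ic.2) pvV2Patterns
          (PySem.List.enumerate cols, PySem.Set.empty)).2 := by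
        rw [hmem]
        exact ⟨ic, hicE, rfl, by rw [hic2]; exact hq⟩
      rw [hnil] at this
      exact (List.not_mem_nil).elim this
    · intro hnil
      rw [List.eq_nil_iff_forall_not_mem]
      intro i hi
      obtain ⟨ic, hicE, _, hq⟩ := (hmem i).mp hi
      have hcmem : ic.2 ∈ cols := by
        rw [← PySem.List.map_snd_enumerate cols (0 : Int)]
        exact List.mem_map_of_mem hicE
      exact (List.filter_eq_nil_iff.mp hnil) ic.2 hcmem hq
  simp only [make_default_views, make_default_views_alt]
  rw [pv_filter_complement]
  rw [show (pvV2Patterns.foldl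
    (fun (st : List (Int × String) × PySem.Set Int) p =>
      st.1.foldl
        (fun (st2 : List (Int × String) × PySem.Set Int) ic =>
          if PySem.Str.isIn p ic.2 then (st2.1, PySem.Set.add st2.2 ic.1)
          else (st2.1 ++ [ic], st2.2))
        (([] : List (Int × String)), st.2))
    (PySem.List.enumerate cols, (PySem.Set.empty : PySem.Set Int)))
    = pvSieve (fun p ic => PySem.Str.isIn p ic.2) pvV2Patterns
        (PySem.List.enumerate cols, PySem.Set.empty) from rfl]
  by_cases hc : (cols.filter (fun c => !(pvV2Patterns.any (fun p => PySem.Str.isIn p c)))).length = 0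
      ∨ (cols.filter (fun c => pvV2Patterns.any (fun p => PySem.Str.isIn p c))).length = 0
  · rw [if_pos hc, if_pos]
    rcases hc with hc | hc
    · exact Or.inl (by rw [hlen1]; exact hc)
    · exact Or.inr (hlen2.mpr hc)
  · rw [if_neg hc, if_neg]
    · rw [hmap1, hview2]
    · rintro (hb | hb)
      · exact hc (Or.inl (by rw [← hlen1]; exact hb))
      · exact hc (Or.inr (hlen2.mp hb))

theorem make_default_views_spec : Claim_equal_make_default_views := by
  intro cols _
  exact pv_main cols
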